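-- pv_equiv track=rewrite | github.com/yeoeol/Algo | 프로그래머스/3/12938. 최고의 집합/최고의 집합.py | solution
-- ===== SOURCE A (Python) =====
-- def solution(n, s):
--     if s < n:
--         return [-1]
--
--     base = s // n
--     remainder = s % n
--
--     lst = [base]*n
--
--     for i in range(remainder):
--         lst[-(i+1)] += 1
--
--     return lst
-- ===== SOURCE B (Python) =====
-- def solution(n, s):
--     if s < n:
--         return [-1]
--     return [(s + i) // n for i in range(n)]
-- ===== Notes on version B (the rewrite author's own statement) =====
-- stated objective: simpler
-- what changed: Replaces the base/remainder construction with an in-place tail-patch loop by a single comprehension computing each element as (s+i)//n.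
import Mathlib
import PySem

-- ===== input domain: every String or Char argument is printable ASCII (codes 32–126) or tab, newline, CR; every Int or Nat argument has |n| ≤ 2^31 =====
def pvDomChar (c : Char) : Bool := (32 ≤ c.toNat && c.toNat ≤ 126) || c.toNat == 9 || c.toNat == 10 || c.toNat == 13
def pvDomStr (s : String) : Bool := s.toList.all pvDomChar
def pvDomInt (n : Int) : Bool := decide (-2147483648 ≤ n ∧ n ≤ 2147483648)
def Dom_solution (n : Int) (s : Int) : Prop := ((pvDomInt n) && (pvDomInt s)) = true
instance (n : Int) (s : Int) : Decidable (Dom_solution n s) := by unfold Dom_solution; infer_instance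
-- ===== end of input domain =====

-- B replaces A's base/remainder construction plus in-place tail-patch loop by a single
-- per-element closed-form division (s+i)//n; objective: simpler.

-- ===== PORT A =====
def solution (n : Int) (s : Int) : List Int :=
  if s < n then [-1]
  else
    let base := PySem.Int.floordiv s n
    let remainder := PySem.Int.mod s n
    let lst := List.replicate n.toNat base
    (PySem.List.pyRange 0 remainder 1).foldl
      (fun acc i => PySem.List.pySetD acc (-(i+1)) (PySem.List.pyGetD acc (-(i+1)) 0 + 1)) lst

-- ===== PORT B =====
def solution_alt (n : Int) (s : Int) : List Int :=
  if s < n then [-1]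
  else (PySem.List.pyRange 0 n 1).map (fun i => PySem.Int.floordiv (s + i) n)

-- ===== PRECONDITION & SPEC =====
-- Pre_ excludes exactly n = 0 with 0 ≤ s, where the Python A raises ZeroDivisionError on s // n.
def Pre_solution (n : Int) (s : Int) : Prop := ¬ (n = 0 ∧ 0 ≤ s)
instance (n : Int) (s : Int) : Decidable (Pre_solution n s) := by unfold Pre_solution; infer_instance
def pvWitness_solution : Int × Int := (3, 10)

def Spec_solution (n : Int) (s : Int) (out : List Int) : Prop := out = solution_alt n s
instance (n : Int) (s : Int) (out : List Int) : Decidable (Spec_solution n s out) := by unfold Spec_solution; infer_instance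

-- ===== CLAIM (what is proved, stated in full; the proofs are below) =====
def Claim_equal_solution : Prop := ∀ (n : Int) (s : Int), Dom_solution n s → Pre_solution n s → Spec_solution n s (solution n s)

-- ===== LEMMAS AND PROOFS =====

-- setting the last cell of the q-block turns it into a (q+1)-cell
theorem set_repl_append (a k : Nat) (q v : Int) (ha : 0 < a) :
    (List.replicate a q ++ List.replicate k v).set (a - 1) v
      = List.replicate (a - 1) q ++ List.replicate (k + 1) v := by
  obtain ⟨b, rfl⟩ : ∃ b, a = b + 1 := ⟨a - 1, by omega⟩
  rw [show b + 1 - 1 = b from rfl, List.replicate_succ' (n := b), List.append_assoc,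
      List.set_append_right _ _ (by simp), show b - (List.replicate b q).length = 0 by simp]
  simp [List.replicate_succ]

theorem foldA (N : Nat) (q : Int) (k : Nat) (hk : k ≤ N) :
    (PySem.List.pyRange 0 (k : Int) 1).foldl
      (fun acc i => PySem.List.pySetD acc (-(i+1)) (PySem.List.pyGetD acc (-(i+1)) 0 + 1))
      (List.replicate N q)
      = List.replicate (N - k) q ++ List.replicate k (q + 1) := by
  induction k with
  | zero => simp [PySem.List.pyRange_one_eq_nil]
  | succ k ih =>
    have hcast : ((k + 1 : Nat) : Int) = (k : Int) + 1 := by push_cast; ring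
    rw [hcast, PySem.List.pyRange_one_succ_right (by positivity), List.foldl_append,
        ih (by omega)]
    simp only [List.foldl_cons, List.foldl_nil]
    set L := List.replicate (N - k) q ++ List.replicate k (q + 1) with hL
    have hlen : L.length = N := by simp [hL]; omega
    have hidx : -((k : Int) + 1) = -(((k + 1 : Nat) : Int)) := by push_cast; ring
    have hget : PySem.List.pyGetD L (-(((k + 1) : Nat) : Int)) 0 = q := by
      rw [PySem.List.pyGetD_neg_natCast L (k+1) 0 (by omega) (by omega),
          List.getElem_eq_iff]
      rw [hlen, hL, show N - (k+1) = (N - k) - 1 by omega,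
          List.getElem?_append_left (by simp; omega)]
      simp [List.getElem?_replicate]
      omega
    rw [hidx, hget]
    have hset : PySem.List.pySetD L (-(((k+1 : Nat)) : Int)) (q + 1)
        = L.set (N - (k + 1)) (q + 1) := by
      simp [PySem.List.pySetD, PySem.List.pySet?, PySem.List.pyIdx?, hlen,
            show ¬((k:Int) ≤ -1) by omega, show k < N by omega]
    rw [hset, show N - (k+1) = (N - k) - 1 by omega,
        set_repl_append (N - k) k q (q+1) (by omega)]

theorem map_const_of_mem {l : List Int} {f : Int → Int} {c : Int} (h : ∀ x ∈ l, f x = c) :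
    l.map f = List.replicate l.length c := by
  rw [List.map_congr_left h]
  simp

-- B's comprehension, characterised the same way
theorem altMap (n s : Int) (hn : 0 < n) :
    (PySem.List.pyRange 0 n 1).map (fun i => PySem.Int.floordiv (s + i) n)
      = List.replicate (n - PySem.Int.mod s n).toNat (PySem.Int.floordiv s n)
        ++ List.replicate (PySem.Int.mod s n).toNat (PySem.Int.floordiv s n + 1) := by
  set q := PySem.Int.floordiv s n with hq
  set r := PySem.Int.mod s n with hr
  have hr0 : 0 ≤ r := PySem.Int.mod_nonneg _ hn
  have hrn : r < n := PySem.Int.mod_lt _ hn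
  have hqs : q * n + r = s := PySem.Int.floordiv_mul_add_mod s n
  rw [PySem.List.pyRange_one_append 0 (n - r) n (by omega) (by omega), List.map_append]
  have h1 : (PySem.List.pyRange 0 (n - r) 1).map (fun i => PySem.Int.floordiv (s + i) n)
      = List.replicate (n - r).toNat q := by
    rw [map_const_of_mem (c := q) ?_, PySem.List.length_pyRange_one]
    · norm_num
    · intro x hx
      rw [PySem.List.mem_pyRange_one] at hx
      rw [PySem.Int.floordiv_eq_iff_of_pos hn]
      constructor
      · nlinarith [hx.1]
      · nlinarith [hx.2]
  have h2 : (PySem.List.pyRange (n - r) n 1).map (fun i => PySem.Int.floordiv (s + i) n)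
      = List.replicate r.toNat (q + 1) := by
    rw [map_const_of_mem (c := q + 1) ?_, PySem.List.length_pyRange_one]
    · congr 1; omega
    · intro x hx
      rw [PySem.List.mem_pyRange_one] at hx
      rw [PySem.Int.floordiv_eq_iff_of_pos hn]
      constructor
      · nlinarith [hx.1]
      · nlinarith [hx.2]
  rw [h1, h2]

-- ===== VERDICT (by name: the statement is the Claim_ definition above) =====
theorem solution_spec : Claim_equal_solution := by
  intro n s hdom hpre
  unfold Spec_solution solution solution_alt
  by_cases hlt : s < n
  · simp [hlt]
  · simp only [if_neg hlt]
    by_cases hn : 0 < n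
    · have hr0 : 0 ≤ PySem.Int.mod s n := PySem.Int.mod_nonneg _ hn
      have hrn : PySem.Int.mod s n < n := PySem.Int.mod_lt _ hn
      rw [altMap n s hn,
          show PySem.Int.mod s n = (((PySem.Int.mod s n).toNat : Nat) : Int) by omega,
          foldA n.toNat _ (PySem.Int.mod s n).toNat (by omega)]
      congr 2
      omega
    · rcases lt_or_eq_of_le (le_of_not_gt hn) with hneg | h0
      · have hb := PySem.Int.mod_neg_bounds s (b := n) hneg
        rw [PySem.List.pyRange_one_eq_nil (by omega), PySem.List.pyRange_one_eq_nil (by omega)]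
        simp [Int.toNat_of_nonpos (le_of_lt hneg)]
      · exact absurd ⟨h0, by omega⟩ hpre
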